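-- pv_equiv track=rewrite | github.com/mindware2025/pdfconvert | budg/bud2026_headers.py | filter_headers_by_quarter
-- ===== SOURCE A (Python) =====
-- QUARTER_BLOCKS = {
--     "Q1": [
--         "Collections FC\n31-03-2026",
--         "Expected AR",
--         "Provision Effect",
--         "AR Provision FC at 31-03-2026",
--         "",
--     ],
--     "Q2": [
--         "Collections FC\n30-06-2026",
--         "Expected AR",
--         "Provision Effect",
--         "AR Provision FC at 30-06-2026",
--         "",
--     ],
--     "Q3": [
--         "Collections FC\n30-09-2026",
--         "Expected AR",
--         "Provision Effect",
--         "AR Provision FC at 30-09-2026",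
--         "",
--     ],
--     "Q4": [
--         "Collections FC\n31-12-2026",
--         "Expected AR",
--         "Provision Effect",
--         "AR Provision FC at 31-12-2026",
--         "",
--     ],
-- }
--
-- QUARTER_BLOCK_SIZE = 5
--
-- def remove_quarter_block(headers, quarter):
--     """Remove the entire block of a specific quarter (5 columns: FC, Exp AR, Prov Eff, AR FC, spacer)"""
--     if quarter not in QUARTER_BLOCKS:
--         return headers
--     start_header = QUARTER_BLOCKS[quarter][0]
--     if start_header not in headers:
--         return headers
--     start_idx = headers.index(start_header)
--     end_idx = start_idx + QUARTER_BLOCK_SIZE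
--     return headers[:start_idx] + headers[end_idx:]
--
-- def filter_headers_by_quarter(headers, selected_quarter):
--     """
--     Keep:
--       - All base columns
--       - Selected quarter block
--       - Later quarter blocks
--       - Always keep 2027 + 2028 blocks
--     Remove:
--       - Earlier quarter blocks
--     """
--     order = ["Q1", "Q2", "Q3", "Q4"]
--     if selected_quarter == "Q1":
--         return headers
--     idx = order.index(selected_quarter)
--     for q in order[:idx]:
--         headers = remove_quarter_block(headers, q)
--     return headers
-- ===== SOURCE B (Python) =====
-- QUARTER_BLOCKS = {
--     "Q1": [
--         "Collections FC\n31-03-2026",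
--         "Expected AR",
--         "Provision Effect",
--         "AR Provision FC at 31-03-2026",
--         "",
--     ],
--     "Q2": [
--         "Collections FC\n30-06-2026",
--         "Expected AR",
--         "Provision Effect",
--         "AR Provision FC at 30-06-2026",
--         "",
--     ],
--     "Q3": [
--         "Collections FC\n30-09-2026",
--         "Expected AR",
--         "Provision Effect",
--         "AR Provision FC at 30-09-2026",
--         "",
--     ],
--     "Q4": [
--         "Collections FC\n31-12-2026",
--         "Expected AR",
--         "Provision Effect",
--         "AR Provision FC at 31-12-2026",
--         "",
--     ],
-- }
--
-- QUARTER_BLOCK_SIZE = 5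
--
-- def filter_headers_by_quarter(headers, selected_quarter):
--     """Single filtering pass: collect the index ranges of all earlier quarter
--     blocks into one drop set, then keep every header whose index is not dropped."""
--     order = ["Q1", "Q2", "Q3", "Q4"]
--     if selected_quarter == "Q1":
--         return headers
--     drop = set()
--     for q in order[:order.index(selected_quarter)]:
--         block = QUARTER_BLOCKS.get(q)
--         if block is not None and block[0] in headers:
--             start = headers.index(block[0])
--             drop.update(range(start, start + QUARTER_BLOCK_SIZE))
--     return [h for i, h in enumerate(headers) if i not in drop]
-- ===== Notes on version B (the rewrite author's own statement) =====
-- stated objective: alternative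
-- what changed: B collects the index ranges of all earlier-quarter blocks into one drop set and keeps the surviving headers in a single enumerate-filter pass, instead of A's sequential scan-and-slice that rebuilds the list once per earlier quarter.
import Mathlib
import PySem

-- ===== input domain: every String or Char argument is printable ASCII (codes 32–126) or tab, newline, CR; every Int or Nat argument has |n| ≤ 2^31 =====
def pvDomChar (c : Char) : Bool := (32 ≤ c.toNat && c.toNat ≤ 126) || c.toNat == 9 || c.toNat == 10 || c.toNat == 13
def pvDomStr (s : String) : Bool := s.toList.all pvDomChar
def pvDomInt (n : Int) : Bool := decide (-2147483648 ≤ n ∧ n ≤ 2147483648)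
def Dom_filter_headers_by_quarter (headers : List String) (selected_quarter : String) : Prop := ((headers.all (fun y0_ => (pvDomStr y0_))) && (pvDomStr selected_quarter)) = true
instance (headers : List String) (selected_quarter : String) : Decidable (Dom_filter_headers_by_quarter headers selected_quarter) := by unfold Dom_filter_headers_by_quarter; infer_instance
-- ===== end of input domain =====

-- B replaces A's repeated scan-and-slice (one list rebuild per earlier quarter) by one drop-index
-- set and a single filtering pass over the headers (objective: alternative single-pass decomposition).

-- ===== PORT A =====
-- module constant QUARTER_BLOCKS
def pvQB : PySem.Dict String (List String) :=
  ((((PySem.Dict.empty.insert "Q1"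
      ["Collections FC\n31-03-2026", "Expected AR", "Provision Effect", "AR Provision FC at 31-03-2026", ""]).insert "Q2"
      ["Collections FC\n30-06-2026", "Expected AR", "Provision Effect", "AR Provision FC at 30-06-2026", ""]).insert "Q3"
      ["Collections FC\n30-09-2026", "Expected AR", "Provision Effect", "AR Provision FC at 30-09-2026", ""]).insert "Q4"
      ["Collections FC\n31-12-2026", "Expected AR", "Provision Effect", "AR Provision FC at 31-12-2026", ""])

-- module constant QUARTER_BLOCK_SIZE
def pvQBS : Int := 5

def remove_quarter_block (headers : List String) (quarter : String) : List String :=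
  if ¬ (PySem.Dict.contains pvQB quarter) then headers
  else
    match PySem.List.pyGet? (PySem.Dict.getD pvQB quarter []) 0 with
    | none => headers   -- unreachable: every block literal is nonempty
    | some start_header =>
      if ¬ (start_header ∈ headers) then headers
      else
        match PySem.List.index? headers start_header with
        | none => headers   -- unreachable: membership was just checked
        | some start_idx =>
          PySem.List.slice headers none (some (start_idx : Int)) ++
            PySem.List.slice headers (some ((start_idx : Int) + pvQBS)) none

def filter_headers_by_quarter (headers : List String) (selected_quarter : String) : List String :=
  let order : List String := ["Q1", "Q2", "Q3", "Q4"]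
  if selected_quarter = "Q1" then headers
  else
    match PySem.List.index? order selected_quarter with
    | none => headers   -- Python raises ValueError here; excluded by Pre_
    | some idx =>
      (PySem.List.slice order none (some (idx : Int))).foldl remove_quarter_block headers

-- ===== PORT B =====
def filter_headers_by_quarter_alt (headers : List String) (selected_quarter : String) : List String :=
  let order : List String := ["Q1", "Q2", "Q3", "Q4"]
  if selected_quarter = "Q1" then headers
  else
    match PySem.List.index? order selected_quarter with
    | none => headers   -- Python raises ValueError here; excluded by Pre_
    | some idx =>
      let drop : PySem.Set Int :=
        (PySem.List.slice order none (some (idx : Int))).foldl (fun drop q =>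
          match PySem.Dict.get? pvQB q with
          | none => drop
          | some block =>
            match PySem.List.pyGet? block 0 with
            | none => drop   -- unreachable: every block literal is nonempty
            | some s =>
              if s ∈ headers then
                match PySem.List.index? headers s with
                | none => drop   -- unreachable: membership was just checked
                | some start =>
                  PySem.Set.update drop (PySem.List.pyRange (start : Int) ((start : Int) + pvQBS) 1)
              else drop) PySem.Set.empty
      ((PySem.List.enumerate headers 0).filter (fun p => ¬ (PySem.Set.contains drop p.1))).map (·.2)

-- ===== PRECONDITION & SPEC =====
-- the start headers of the quarters strictly before selected_quarter in Q1..Q4 order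
def pvEarlierStarts (selected_quarter : String) : List String :=
  if selected_quarter = "Q2" then ["Collections FC\n31-03-2026"]
  else if selected_quarter = "Q3" then ["Collections FC\n31-03-2026", "Collections FC\n30-06-2026"]
  else if selected_quarter = "Q4" then ["Collections FC\n31-03-2026", "Collections FC\n30-06-2026", "Collections FC\n30-09-2026"]
  else []

-- Pre_ excludes unknown selected_quarter values, on which A raises ValueError, and header lists in
-- which two earlier-quarter start headers first occur less than 5 positions apart (overlapping
-- blocks), where A's shift-dependent sequential removal order is accidental.
def Pre_filter_headers_by_quarter (headers : List String) (selected_quarter : String) : Prop :=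
  (selected_quarter = "Q1" ∨ selected_quarter = "Q2" ∨ selected_quarter = "Q3" ∨ selected_quarter = "Q4") ∧
  List.Pairwise (fun i j => i + 5 ≤ j ∨ j + 5 ≤ i)
    ((pvEarlierStarts selected_quarter).filterMap (fun s => PySem.List.index? headers s))
instance (headers : List String) (selected_quarter : String) : Decidable (Pre_filter_headers_by_quarter headers selected_quarter) := by unfold Pre_filter_headers_by_quarter; infer_instance

def pvWitness_filter_headers_by_quarter : List String × String :=
  (["Collections FC\n31-03-2026", "Expected AR", "Provision Effect", "AR Provision FC at 31-03-2026", "", "Total"], "Q2")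

def Spec_filter_headers_by_quarter (headers : List String) (selected_quarter : String) (out : List String) : Prop := out = filter_headers_by_quarter_alt headers selected_quarter
instance (headers : List String) (selected_quarter : String) (out : List String) : Decidable (Spec_filter_headers_by_quarter headers selected_quarter out) := by unfold Spec_filter_headers_by_quarter; infer_instance

-- ===== CLAIM (what is proved, stated in full; the proofs are below) =====
def Claim_equal_filter_headers_by_quarter : Prop := ∀ (headers : List String) (selected_quarter : String), Dom_filter_headers_by_quarter headers selected_quarter → Pre_filter_headers_by_quarter headers selected_quarter → Spec_filter_headers_by_quarter headers selected_quarter (filter_headers_by_quarter headers selected_quarter)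

-- ===== LEMMAS AND PROOFS =====

-- proof-side abbreviations for the three earlier-quarter start headers
def pvS1 : String := "Collections FC\n31-03-2026"
def pvS2 : String := "Collections FC\n30-06-2026"
def pvS3 : String := "Collections FC\n30-09-2026"

-- removing the 5-element block starting at index i (what one remove_quarter_block call does)
def rmAt (hs : List String) (i : Nat) : List String := hs.take i ++ hs.drop (i + 5)

-- the keep-by-index comprehension of port B, with an explicit enumerate start
def keepF (hs : List String) (s : Int) (f : Int → Bool) : List String :=
  ((PySem.List.enumerate hs s).filter (fun p => ¬ (f p.1))).map (·.2)

theorem keepF_congr_range (hs : List String) (s : Int) (f g : Int → Bool)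
    (h : ∀ x : Int, s ≤ x → x < s + hs.length → f x = g x) : keepF hs s f = keepF hs s g := by
  unfold keepF
  congr 1
  apply List.filter_congr
  intro p hp
  rw [PySem.List.mem_enumerate_iff] at hp
  obtain ⟨k, hk, rfl⟩ := hp
  simp only [h (s + k) (by omega) (by omega)]

theorem keepF_append (A B : List String) (s : Int) (f : Int → Bool) :
    keepF (A ++ B) s f = keepF A s f ++ keepF B (s + A.length) f := by
  unfold keepF
  rw [PySem.List.enumerate_append, List.filter_append, List.map_append]

theorem keepF_all_drop (hs : List String) (s : Int) (f : Int → Bool)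
    (h : ∀ x : Int, s ≤ x → x < s + hs.length → f x = true) : keepF hs s f = [] := by
  unfold keepF
  rw [List.filter_eq_nil_iff.mpr, List.map_nil]
  intro p hp
  rw [PySem.List.mem_enumerate_iff] at hp
  obtain ⟨k, hk, rfl⟩ := hp
  simp [h (s + k) (by omega) (by omega)]

theorem keepF_all_keep (hs : List String) (s : Int) (f : Int → Bool)
    (h : ∀ x : Int, s ≤ x → x < s + hs.length → f x = false) : keepF hs s f = hs := by
  unfold keepF
  rw [List.filter_eq_self.mpr, PySem.List.map_snd_enumerate]
  intro p hp
  rw [PySem.List.mem_enumerate_iff] at hp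
  obtain ⟨k, hk, rfl⟩ := hp
  simp [h (s + k) (by omega) (by omega)]

theorem keepF_shift (hs : List String) (d : Int) (f : Int → Bool) :
    ∀ s : Int, keepF hs (s + d) f = keepF hs s (fun x => f (x + d)) := by
  induction hs with
  | nil => intro s; rfl
  | cons a t ih =>
    intro s
    have h2 := ih (s + 1)
    unfold keepF at h2 ⊢
    rw [PySem.List.enumerate_cons, PySem.List.enumerate_cons]
    have h1 : s + d + 1 = (s + 1) + d := by ring
    rw [h1]
    simp only [List.filter_cons]
    simp at h2
    by_cases hb : f (s + d) = true
    · simp [hb, h2]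
    · simp at hb
      simp [hb, h2]

-- peeling the block [i, i+5) off the drop predicate corresponds to one rmAt on the list
theorem peel (hs : List String) (i : Nat) (g : Int → Bool) :
    keepF hs 0 (fun x => decide ((i : Int) ≤ x ∧ x < (i : Int) + 5) || g x)
    = keepF (rmAt hs i) 0 (fun x => if x < (i : Int) then g x else g (x + 5)) := by
  by_cases hin : hs.length ≤ i
  · have h1 : rmAt hs i = hs := by
      unfold rmAt
      rw [List.take_of_length_le hin, List.drop_eq_nil_of_le (by omega), List.append_nil]
    rw [h1]
    apply keepF_congr_range
    intro x hx0 hxl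
    have : ¬ ((i : Int) ≤ x ∧ x < (i : Int) + 5) := by omega
    rw [if_pos (by omega)]
    simp [this]
  · push_neg at hin
    set A := hs.take i with hA
    set BC := hs.drop i with hBC
    have hAlen : A.length = i := by rw [hA, List.length_take]; omega
    have hsplit : hs = A ++ BC := (List.take_append_drop i hs).symm
    by_cases h5 : hs.length ≤ i + 5
    · -- the block reaches the end of the list: rmAt hs i = A, everything from i on is dropped
      have h1 : rmAt hs i = A := by
        unfold rmAt
        rw [List.drop_eq_nil_of_le (by omega), List.append_nil, hA]
      rw [h1]
      conv_lhs => rw [hsplit]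
      rw [keepF_append, zero_add, hAlen]
      rw [keepF_all_drop BC _ _ (by
        intro x hx1 hx2
        have : BC.length = hs.length - i := by rw [hBC, List.length_drop]
        rw [this] at hx2
        simp only [Bool.or_eq_true, decide_eq_true_eq]
        left; omega)]
      rw [List.append_nil]
      apply keepF_congr_range
      intro x hx0 hxl
      rw [hAlen] at hxl
      have : ¬ ((i : Int) ≤ x ∧ x < (i : Int) + 5) := by omega
      rw [if_pos (by omega)]
      simp [this]
    · push_neg at h5
      set B := BC.take 5 with hB
      set C := BC.drop 5 with hC
      have hBClen : BC.length = hs.length - i := by rw [hBC, List.length_drop]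
      have hBlen : B.length = 5 := by rw [hB, List.length_take]; omega
      have hCdef : C = hs.drop (i + 5) := by rw [hC, hBC, List.drop_drop]
      have h1 : rmAt hs i = A ++ C := by unfold rmAt; rw [← hA, ← hCdef]
      have hsplit2 : hs = A ++ (B ++ C) := by
        rw [hsplit]; congr 1; rw [hB, hC, List.take_append_drop]
      conv_lhs => rw [hsplit2]
      rw [keepF_append, keepF_append, zero_add, hAlen, hBlen]
      rw [keepF_all_drop B _ _ (by
        intro x hx1 hx2
        rw [hBlen] at hx2
        simp only [Bool.or_eq_true, decide_eq_true_eq]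
        left; omega)]
      rw [List.nil_append]
      have hc5 : ((5 : Nat) : Int) = (5 : Int) := by norm_num
      rw [hc5]
      have hshift : keepF C ((i : Int) + 5) (fun x => decide ((i : Int) ≤ x ∧ x < (i : Int) + 5) || g x)
          = keepF C (i : Int) (fun x => if x < (i : Int) then g x else g (x + 5)) := by
        rw [keepF_shift C 5 _ (i : Int)]
        apply keepF_congr_range
        intro x hx0 hxl
        have hd : decide ((i : Int) ≤ x + 5 ∧ x + 5 < (i : Int) + 5) = false := by
          rw [decide_eq_false_iff_not]; omega
        show (decide ((i : Int) ≤ x + 5 ∧ x + 5 < (i : Int) + 5) || g (x + 5)) = _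
        rw [hd, Bool.false_or, if_neg (by omega : ¬ x < (i : Int))]
      rw [hshift]
      rw [h1, keepF_append, zero_add, hAlen]
      congr 1
      apply keepF_congr_range
      intro x hx0 hxl
      rw [hAlen] at hxl
      have hd : decide ((i : Int) ≤ x ∧ x < (i : Int) + 5) = false := by
        rw [decide_eq_false_iff_not]; omega
      show (decide ((i : Int) ≤ x ∧ x < (i : Int) + 5) || g x) = _
      rw [hd, Bool.false_or, if_pos (by omega : x < (i : Int))]

-- first-occurrence index after removing a separated block: shifted down by 5 iff it was above
theorem index?_rmAt_some (hs : List String) (v : String) (i j : Nat)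
    (hj : PySem.List.index? hs v = some j) (hsep : i + 5 ≤ j ∨ j + 5 ≤ i) :
    PySem.List.index? (rmAt hs i) v = some (if j < i then j else j - 5) := by
  rw [PySem.List.index?_eq_some_iff] at hj
  obtain ⟨pre, suf, rfl, hlen, hnp⟩ := hj
  rcases hsep with hsep | hsep
  · -- i + 5 ≤ j : occurrence above the removed block, index drops by 5
    rw [if_neg (by omega)]
    have htake : (pre ++ v :: suf).take i = pre.take i := by
      rw [List.take_append]
      have : i - pre.length = 0 := by omega
      rw [this, List.take_zero, List.append_nil]
    have hdrop : (pre ++ v :: suf).drop (i + 5) = pre.drop (i + 5) ++ v :: suf := by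
      rw [List.drop_append]
      have : i + 5 - pre.length = 0 := by omega
      rw [this, List.drop_zero]
    rw [PySem.List.index?_eq_some_iff]
    refine ⟨pre.take i ++ pre.drop (i + 5), suf, ?_, ?_, ?_⟩
    · unfold rmAt; rw [htake, hdrop, List.append_assoc]
    · rw [List.length_append, List.length_take, List.length_drop]; omega
    · intro hm
      rcases List.mem_append.mp hm with hm | hm
      · exact hnp (List.mem_of_mem_take hm)
      · exact hnp (List.mem_of_mem_drop hm)
  · -- j + 5 ≤ i : occurrence below the removed block, index unchanged
    rw [if_pos (by omega)]
    have htake : (pre ++ v :: suf).take i = pre ++ v :: suf.take (i - j - 1) := by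
      rw [List.take_append, List.take_of_length_le (by omega)]
      have : i - pre.length = (i - j - 1) + 1 := by omega
      rw [this, List.take_succ_cons]
    rw [PySem.List.index?_eq_some_iff]
    refine ⟨pre, suf.take (i - j - 1) ++ (pre ++ v :: suf).drop (i + 5), ?_, hlen, hnp⟩
    unfold rmAt
    rw [htake, List.append_assoc]
    simp [List.cons_append]

theorem index?_rmAt_none (hs : List String) (v : String) (i : Nat)
    (h : PySem.List.index? hs v = none) : PySem.List.index? (rmAt hs i) v = none := by
  rw [PySem.List.index?_eq_none_iff] at h ⊢
  intro hm
  rcases List.mem_append.mp hm with hm | hm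
  · exact h (List.mem_of_mem_take hm)
  · exact h (List.mem_of_mem_drop hm)

-- one remove_quarter_block call, for a quarter whose block starts with s
theorem rqbA_some (q s : String) (hs : List String) (i : Nat)
    (hc : PySem.Dict.contains pvQB q = true)
    (hb : PySem.List.pyGet? (PySem.Dict.getD pvQB q []) 0 = some s)
    (hidx : PySem.List.index? hs s = some i) :
    remove_quarter_block hs q = rmAt hs i := by
  have hmem : s ∈ hs := (PySem.List.index?_isSome_iff hs s).mp (by rw [hidx]; rfl)
  unfold remove_quarter_block
  rw [hc, hb]
  simp only [Bool.not_true, hmem, not_true_eq_false, if_false, hidx]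
  show PySem.List.slice hs none (some ((i : Nat) : Int)) ++
      PySem.List.slice hs (some (((i : Nat) : Int) + pvQBS)) none = rmAt hs i
  have h5 : ((i : Nat) : Int) + pvQBS = (((i + 5 : Nat)) : Int) := by unfold pvQBS; push_cast; ring
  rw [h5, PySem.List.slice_to_natCast, PySem.List.slice_from_natCast]
  rfl

theorem rqbA_none (q s : String) (hs : List String)
    (hc : PySem.Dict.contains pvQB q = true)
    (hb : PySem.List.pyGet? (PySem.Dict.getD pvQB q []) 0 = some s)
    (hidx : PySem.List.index? hs s = none) :
    remove_quarter_block hs q = hs := by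
  have hmem : s ∉ hs := (PySem.List.index?_eq_none_iff hs s).mp hidx
  unfold remove_quarter_block
  rw [hc, hb]
  simp [hmem]

-- contains on a Set after update
theorem set_contains_update (d : PySem.Set Int) (l : List Int) (x : Int) :
    PySem.Set.contains (PySem.Set.update d l) x = (PySem.Set.contains d x || l.contains x) := by
  have hc : ∀ (s : List Int), PySem.Set.contains s x = decide (x ∈ s) := fun s =>
    List.contains_eq_mem x s
  rw [hc, hc, List.contains_eq_mem]
  by_cases hx : x ∈ PySem.Set.update d l
  · rcases (PySem.Set.mem_update d l x).mp hx with h | h <;> simp [hx, h]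
  · have h2 := hx
    rw [PySem.Set.mem_update] at h2
    push_neg at h2
    simp [hx, h2.1, h2.2]

theorem contains_range5 (a x : Int) :
    (PySem.List.pyRange a (a + 5) 1).contains x = decide (a ≤ x ∧ x < a + 5) := by
  rw [List.contains_eq_mem, decide_eq_decide]
  exact PySem.List.mem_pyRange_one

-- the block predicate after an rmAt at a separated index i: shift by 5 above i
theorem shiftR (i j : Nat) (x : Int) (hsep : i + 5 ≤ j ∨ j + 5 ≤ i) :
    (if x < (i : Int) then decide ((j : Int) ≤ x ∧ x < (j : Int) + 5)
     else decide ((j : Int) ≤ x + 5 ∧ x + 5 < (j : Int) + 5))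
    = decide (((if j < i then j else j - 5 : Nat) : Int) ≤ x ∧
        x < ((if j < i then j else j - 5 : Nat) : Int) + 5) := by
  rcases hsep with hsep | hsep <;> split_ifs <;> rw [decide_eq_decide] <;> omega


-- the drop-indices predicate of one 5-block
def pvR (j : Nat) (x : Int) : Bool := decide ((j : Int) ≤ x ∧ x < (j : Int) + 5)

-- one step of port B's drop-set fold, with the headers list as a parameter
def bStep (headers : List String) (drop : PySem.Set Int) (q : String) : PySem.Set Int :=
  match PySem.Dict.get? pvQB q with
  | none => drop
  | some block =>
    match PySem.List.pyGet? block 0 with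
    | none => drop
    | some s =>
      if s ∈ headers then
        match PySem.List.index? headers s with
        | none => drop
        | some start =>
          PySem.Set.update drop (PySem.List.pyRange (start : Int) ((start : Int) + pvQBS) 1)
      else drop

theorem A_unfold (hs : List String) (sq : String) (hne : ¬ sq = "Q1") (idx : Nat)
    (hidx : PySem.List.index? ["Q1", "Q2", "Q3", "Q4"] sq = some idx) :
    filter_headers_by_quarter hs sq
    = (PySem.List.slice ["Q1", "Q2", "Q3", "Q4"] none (some (idx : Int))).foldl
        remove_quarter_block hs := by
  unfold filter_headers_by_quarter
  rw [if_neg hne, hidx]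

theorem alt_unfold (hs : List String) (sq : String) (hne : ¬ sq = "Q1") (idx : Nat)
    (hidx : PySem.List.index? ["Q1", "Q2", "Q3", "Q4"] sq = some idx) :
    filter_headers_by_quarter_alt hs sq
    = keepF hs 0 (fun x => PySem.Set.contains
        ((PySem.List.slice ["Q1", "Q2", "Q3", "Q4"] none (some (idx : Int))).foldl
          (bStep hs) PySem.Set.empty) x) := by
  unfold filter_headers_by_quarter_alt keepF bStep
  rw [if_neg hne, hidx]

theorem bStep_some (hs : List String) (q s : String) (blk : List String) (d : PySem.Set Int)
    (i : Nat) (hg : PySem.Dict.get? pvQB q = some blk)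
    (hb : PySem.List.pyGet? blk 0 = some s) (hidx : PySem.List.index? hs s = some i) :
    bStep hs d q = PySem.Set.update d (PySem.List.pyRange (i : Int) ((i : Int) + pvQBS) 1) := by
  have hmem : s ∈ hs := (PySem.List.index?_isSome_iff hs s).mp (by rw [hidx]; rfl)
  unfold bStep
  rw [hg]
  simp only [hb, hidx, if_pos hmem]

theorem bStep_none (hs : List String) (q s : String) (blk : List String) (d : PySem.Set Int)
    (hg : PySem.Dict.get? pvQB q = some blk)
    (hb : PySem.List.pyGet? blk 0 = some s) (hidx : PySem.List.index? hs s = none) :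
    bStep hs d q = d := by
  have hmem : s ∉ hs := (PySem.List.index?_eq_none_iff hs s).mp hidx
  unfold bStep
  rw [hg]
  simp only [hb, if_neg hmem]

theorem contains_empty (x : Int) : PySem.Set.contains (PySem.Set.empty : PySem.Set Int) x = false := rfl

theorem contains_update_range (d : PySem.Set Int) (j : Nat) (x : Int) :
    PySem.Set.contains (PySem.Set.update d (PySem.List.pyRange (j : Int) ((j : Int) + pvQBS) 1)) x
    = (PySem.Set.contains d x || pvR j x) := by
  rw [set_contains_update]
  congr 1
  show (PySem.List.pyRange (j : Int) ((j : Int) + 5) 1).contains x = _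
  rw [contains_range5]
  rfl

-- peel chains: a union of 1/2/3 pairwise separated 5-blocks equals nested rmAt removals
theorem chain1 (hs : List String) (j1 : Nat) :
    keepF hs 0 (fun x => pvR j1 x) = rmAt hs j1 := by
  have h1 : keepF hs 0 (fun x => pvR j1 x)
      = keepF hs 0 (fun x => decide ((j1 : Int) ≤ x ∧ x < (j1 : Int) + 5) || (fun _ : Int => false) x) := by
    unfold pvR
    congr 1
    funext x
    rw [Bool.or_false]
  rw [h1, peel hs j1 (fun _ => false)]
  exact keepF_all_keep _ _ _ (fun x _ _ => by split <;> rfl)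

theorem chain2 (hs : List String) (j1 j2 : Nat) (hsep : j1 + 5 ≤ j2 ∨ j2 + 5 ≤ j1) :
    keepF hs 0 (fun x => pvR j1 x || pvR j2 x)
    = rmAt (rmAt hs j1) (if j2 < j1 then j2 else j2 - 5) := by
  have h1 : keepF hs 0 (fun x => pvR j1 x || pvR j2 x)
      = keepF (rmAt hs j1) 0 (fun x => if x < (j1 : Int) then pvR j2 x else pvR j2 (x + 5)) := by
    unfold pvR
    exact peel hs j1 (fun x => decide ((j2 : Int) ≤ x ∧ x < (j2 : Int) + 5))
  rw [h1]
  have h2 : (fun x => if x < (j1 : Int) then pvR j2 x else pvR j2 (x + 5))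
      = fun x => pvR (if j2 < j1 then j2 else j2 - 5) x := by
    funext x
    unfold pvR
    exact shiftR j1 j2 x hsep
  rw [h2, chain1]

theorem chain3 (hs : List String) (j1 j2 j3 : Nat)
    (hsep12 : j1 + 5 ≤ j2 ∨ j2 + 5 ≤ j1) (hsep13 : j1 + 5 ≤ j3 ∨ j3 + 5 ≤ j1)
    (hsep23 : j2 + 5 ≤ j3 ∨ j3 + 5 ≤ j2) :
    keepF hs 0 (fun x => pvR j1 x || (pvR j2 x || pvR j3 x))
    = rmAt (rmAt (rmAt hs j1) (if j2 < j1 then j2 else j2 - 5))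
        (if (if j3 < j1 then j3 else j3 - 5) < (if j2 < j1 then j2 else j2 - 5)
         then (if j3 < j1 then j3 else j3 - 5) else (if j3 < j1 then j3 else j3 - 5) - 5) := by
  have h1 : keepF hs 0 (fun x => pvR j1 x || (pvR j2 x || pvR j3 x))
      = keepF (rmAt hs j1) 0 (fun x => if x < (j1 : Int)
          then (pvR j2 x || pvR j3 x) else (pvR j2 (x + 5) || pvR j3 (x + 5))) := by
    unfold pvR
    exact peel hs j1 (fun x => decide ((j2 : Int) ≤ x ∧ x < (j2 : Int) + 5)
      || decide ((j3 : Int) ≤ x ∧ x < (j3 : Int) + 5))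
  rw [h1]
  have h2 : (fun x => if x < (j1 : Int)
        then (pvR j2 x || pvR j3 x) else (pvR j2 (x + 5) || pvR j3 (x + 5)))
      = fun x => pvR (if j2 < j1 then j2 else j2 - 5) x
          || pvR (if j3 < j1 then j3 else j3 - 5) x := by
    funext x
    have e2 := shiftR j1 j2 x hsep12
    have e3 := shiftR j1 j3 x hsep13
    unfold pvR
    by_cases hx : x < (j1 : Int)
    · rw [if_pos hx] at e2 e3
      rw [if_pos hx, e2, e3]
    · rw [if_neg hx] at e2 e3
      rw [if_neg hx, e2, e3]
  rw [h2]
  exact chain2 (rmAt hs j1) _ _ (by split_ifs <;> omega)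

-- ===== VERDICT (by name: the statement is the Claim_ definition above) =====
theorem filter_headers_by_quarter_spec : Claim_equal_filter_headers_by_quarter := by
  intro hs sq _ hpre
  unfold Spec_filter_headers_by_quarter
  obtain ⟨hq, hpair⟩ := hpre
  rcases hq with rfl | rfl | rfl | rfl
  · -- Q1: both short-circuit
    simp [filter_headers_by_quarter, filter_headers_by_quarter_alt]
  · -- Q2: only the Q1 block is removed
    rw [A_unfold hs _ (by decide) 1 rfl, alt_unfold hs _ (by decide) 1 rfl,
      show PySem.List.slice ["Q1", "Q2", "Q3", "Q4"] none (some ((1 : Nat) : Int)) = ["Q1"] from rfl]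
    simp only [List.foldl_cons, List.foldl_nil]
    cases hidx1 : PySem.List.index? hs pvS1 with
    | none =>
      rw [rqbA_none "Q1" pvS1 hs rfl rfl hidx1, bStep_none hs "Q1" pvS1 _ _ rfl rfl hidx1]
      exact (keepF_all_keep _ _ _ (fun _ _ _ => rfl)).symm
    | some j1 =>
      rw [rqbA_some "Q1" pvS1 hs j1 rfl rfl hidx1, bStep_some hs "Q1" pvS1 _ _ j1 rfl rfl hidx1]
      have hfun : (fun x => PySem.Set.contains (PySem.Set.update PySem.Set.empty
            (PySem.List.pyRange (j1 : Int) ((j1 : Int) + pvQBS) 1)) x)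
          = fun x => pvR j1 x := by
        funext x
        rw [contains_update_range, contains_empty, Bool.false_or]
      rw [hfun, chain1]
  · -- Q3: Q1 and Q2 blocks are removed
    rw [A_unfold hs _ (by decide) 2 rfl, alt_unfold hs _ (by decide) 2 rfl,
      show PySem.List.slice ["Q1", "Q2", "Q3", "Q4"] none (some ((2 : Nat) : Int)) = ["Q1", "Q2"] from rfl]
    simp only [List.foldl_cons, List.foldl_nil]
    rw [show pvEarlierStarts "Q3" = [pvS1, pvS2] from rfl] at hpair
    cases hidx1 : PySem.List.index? hs pvS1 with
    | none =>
      rw [rqbA_none "Q1" pvS1 hs rfl rfl hidx1, bStep_none hs "Q1" pvS1 _ _ rfl rfl hidx1]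
      cases hidx2 : PySem.List.index? hs pvS2 with
      | none =>
        rw [rqbA_none "Q2" pvS2 hs rfl rfl hidx2, bStep_none hs "Q2" pvS2 _ _ rfl rfl hidx2]
        exact (keepF_all_keep _ _ _ (fun _ _ _ => rfl)).symm
      | some j2 =>
        rw [rqbA_some "Q2" pvS2 hs j2 rfl rfl hidx2, bStep_some hs "Q2" pvS2 _ _ j2 rfl rfl hidx2]
        have hfun : (fun x => PySem.Set.contains (PySem.Set.update PySem.Set.empty
              (PySem.List.pyRange (j2 : Int) ((j2 : Int) + pvQBS) 1)) x)
            = fun x => pvR j2 x := by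
          funext x
          rw [contains_update_range, contains_empty, Bool.false_or]
        rw [hfun, chain1]
    | some j1 =>
      rw [rqbA_some "Q1" pvS1 hs j1 rfl rfl hidx1, bStep_some hs "Q1" pvS1 _ _ j1 rfl rfl hidx1]
      cases hidx2 : PySem.List.index? hs pvS2 with
      | none =>
        rw [rqbA_none "Q2" pvS2 (rmAt hs j1) rfl rfl (index?_rmAt_none hs pvS2 j1 hidx2),
          bStep_none hs "Q2" pvS2 _ _ rfl rfl hidx2]
        have hfun : (fun x => PySem.Set.contains (PySem.Set.update PySem.Set.empty
              (PySem.List.pyRange (j1 : Int) ((j1 : Int) + pvQBS) 1)) x)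
            = fun x => pvR j1 x := by
          funext x
          rw [contains_update_range, contains_empty, Bool.false_or]
        rw [hfun, chain1]
      | some j2 =>
        simp only [List.filterMap_cons, hidx1, hidx2, List.filterMap_nil] at hpair
        have hsep12 : j1 + 5 ≤ j2 ∨ j2 + 5 ≤ j1 :=
          (List.pairwise_cons.mp hpair).1 j2 (by simp)
        rw [rqbA_some "Q2" pvS2 (rmAt hs j1) _ rfl rfl
            (index?_rmAt_some hs pvS2 j1 j2 hidx2 hsep12),
          bStep_some hs "Q2" pvS2 _ _ j2 rfl rfl hidx2]
        have hfun : (fun x => PySem.Set.contains (PySem.Set.update (PySem.Set.update PySem.Set.empty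
              (PySem.List.pyRange (j1 : Int) ((j1 : Int) + pvQBS) 1))
              (PySem.List.pyRange (j2 : Int) ((j2 : Int) + pvQBS) 1)) x)
            = fun x => pvR j1 x || pvR j2 x := by
          funext x
          rw [contains_update_range, contains_update_range, contains_empty, Bool.false_or]
        rw [hfun, chain2 hs j1 j2 hsep12]
  · -- Q4: Q1, Q2 and Q3 blocks are removed
    rw [A_unfold hs _ (by decide) 3 rfl, alt_unfold hs _ (by decide) 3 rfl,
      show PySem.List.slice ["Q1", "Q2", "Q3", "Q4"] none (some ((3 : Nat) : Int)) = ["Q1", "Q2", "Q3"] from rfl]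
    simp only [List.foldl_cons, List.foldl_nil]
    rw [show pvEarlierStarts "Q4" = [pvS1, pvS2, pvS3] from rfl] at hpair
    cases hidx1 : PySem.List.index? hs pvS1 with
    | none =>
      rw [rqbA_none "Q1" pvS1 hs rfl rfl hidx1, bStep_none hs "Q1" pvS1 _ _ rfl rfl hidx1]
      cases hidx2 : PySem.List.index? hs pvS2 with
      | none =>
        rw [rqbA_none "Q2" pvS2 hs rfl rfl hidx2, bStep_none hs "Q2" pvS2 _ _ rfl rfl hidx2]
        cases hidx3 : PySem.List.index? hs pvS3 with
        | none =>
          rw [rqbA_none "Q3" pvS3 hs rfl rfl hidx3, bStep_none hs "Q3" pvS3 _ _ rfl rfl hidx3]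
          exact (keepF_all_keep _ _ _ (fun _ _ _ => rfl)).symm
        | some j3 =>
          rw [rqbA_some "Q3" pvS3 hs j3 rfl rfl hidx3, bStep_some hs "Q3" pvS3 _ _ j3 rfl rfl hidx3]
          have hfun : (fun x => PySem.Set.contains (PySem.Set.update PySem.Set.empty
                (PySem.List.pyRange (j3 : Int) ((j3 : Int) + pvQBS) 1)) x)
              = fun x => pvR j3 x := by
            funext x
            rw [contains_update_range, contains_empty, Bool.false_or]
          rw [hfun, chain1]
      | some j2 =>
        rw [rqbA_some "Q2" pvS2 hs j2 rfl rfl hidx2, bStep_some hs "Q2" pvS2 _ _ j2 rfl rfl hidx2]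
        cases hidx3 : PySem.List.index? hs pvS3 with
        | none =>
          rw [rqbA_none "Q3" pvS3 (rmAt hs j2) rfl rfl (index?_rmAt_none hs pvS3 j2 hidx3),
            bStep_none hs "Q3" pvS3 _ _ rfl rfl hidx3]
          have hfun : (fun x => PySem.Set.contains (PySem.Set.update PySem.Set.empty
                (PySem.List.pyRange (j2 : Int) ((j2 : Int) + pvQBS) 1)) x)
              = fun x => pvR j2 x := by
            funext x
            rw [contains_update_range, contains_empty, Bool.false_or]
          rw [hfun, chain1]
        | some j3 =>
          simp only [List.filterMap_cons, hidx1, hidx2, hidx3, List.filterMap_nil] at hpair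
          have hsep23 : j2 + 5 ≤ j3 ∨ j3 + 5 ≤ j2 :=
            (List.pairwise_cons.mp hpair).1 j3 (by simp)
          rw [rqbA_some "Q3" pvS3 (rmAt hs j2) _ rfl rfl
              (index?_rmAt_some hs pvS3 j2 j3 hidx3 hsep23),
            bStep_some hs "Q3" pvS3 _ _ j3 rfl rfl hidx3]
          have hfun : (fun x => PySem.Set.contains (PySem.Set.update (PySem.Set.update PySem.Set.empty
                (PySem.List.pyRange (j2 : Int) ((j2 : Int) + pvQBS) 1))
                (PySem.List.pyRange (j3 : Int) ((j3 : Int) + pvQBS) 1)) x)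
              = fun x => pvR j2 x || pvR j3 x := by
            funext x
            rw [contains_update_range, contains_update_range, contains_empty, Bool.false_or]
          rw [hfun, chain2 hs j2 j3 hsep23]
    | some j1 =>
      rw [rqbA_some "Q1" pvS1 hs j1 rfl rfl hidx1, bStep_some hs "Q1" pvS1 _ _ j1 rfl rfl hidx1]
      cases hidx2 : PySem.List.index? hs pvS2 with
      | none =>
        rw [rqbA_none "Q2" pvS2 (rmAt hs j1) rfl rfl (index?_rmAt_none hs pvS2 j1 hidx2),
          bStep_none hs "Q2" pvS2 _ _ rfl rfl hidx2]
        cases hidx3 : PySem.List.index? hs pvS3 with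
        | none =>
          rw [rqbA_none "Q3" pvS3 (rmAt hs j1) rfl rfl (index?_rmAt_none hs pvS3 j1 hidx3),
            bStep_none hs "Q3" pvS3 _ _ rfl rfl hidx3]
          have hfun : (fun x => PySem.Set.contains (PySem.Set.update PySem.Set.empty
                (PySem.List.pyRange (j1 : Int) ((j1 : Int) + pvQBS) 1)) x)
              = fun x => pvR j1 x := by
            funext x
            rw [contains_update_range, contains_empty, Bool.false_or]
          rw [hfun, chain1]
        | some j3 =>
          simp only [List.filterMap_cons, hidx1, hidx2, hidx3, List.filterMap_nil] at hpair
          have hsep13 : j1 + 5 ≤ j3 ∨ j3 + 5 ≤ j1 :=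
            (List.pairwise_cons.mp hpair).1 j3 (by simp)
          rw [rqbA_some "Q3" pvS3 (rmAt hs j1) _ rfl rfl
              (index?_rmAt_some hs pvS3 j1 j3 hidx3 hsep13),
            bStep_some hs "Q3" pvS3 _ _ j3 rfl rfl hidx3]
          have hfun : (fun x => PySem.Set.contains (PySem.Set.update (PySem.Set.update PySem.Set.empty
                (PySem.List.pyRange (j1 : Int) ((j1 : Int) + pvQBS) 1))
                (PySem.List.pyRange (j3 : Int) ((j3 : Int) + pvQBS) 1)) x)
              = fun x => pvR j1 x || pvR j3 x := by
            funext x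
            rw [contains_update_range, contains_update_range, contains_empty, Bool.false_or]
          rw [hfun, chain2 hs j1 j3 hsep13]
      | some j2 =>
        simp only [List.filterMap_cons, hidx1, hidx2, List.filterMap_nil] at hpair
        have hsep12 : j1 + 5 ≤ j2 ∨ j2 + 5 ≤ j1 :=
          (List.pairwise_cons.mp hpair).1 j2 (by simp)
        rw [rqbA_some "Q2" pvS2 (rmAt hs j1) _ rfl rfl
            (index?_rmAt_some hs pvS2 j1 j2 hidx2 hsep12),
          bStep_some hs "Q2" pvS2 _ _ j2 rfl rfl hidx2]
        cases hidx3 : PySem.List.index? hs pvS3 with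
        | none =>
          have hn3 : PySem.List.index? (rmAt (rmAt hs j1) (if j2 < j1 then j2 else j2 - 5)) pvS3 = none :=
            index?_rmAt_none _ pvS3 _ (index?_rmAt_none hs pvS3 j1 hidx3)
          rw [rqbA_none "Q3" pvS3 _ rfl rfl hn3, bStep_none hs "Q3" pvS3 _ _ rfl rfl hidx3]
          have hfun : (fun x => PySem.Set.contains (PySem.Set.update (PySem.Set.update PySem.Set.empty
                (PySem.List.pyRange (j1 : Int) ((j1 : Int) + pvQBS) 1))
                (PySem.List.pyRange (j2 : Int) ((j2 : Int) + pvQBS) 1)) x)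
              = fun x => pvR j1 x || pvR j2 x := by
            funext x
            rw [contains_update_range, contains_update_range, contains_empty, Bool.false_or]
          rw [hfun, chain2 hs j1 j2 hsep12]
        | some j3 =>
          simp only [List.filterMap_cons, hidx3, List.filterMap_nil] at hpair
          have hsep13 : j1 + 5 ≤ j3 ∨ j3 + 5 ≤ j1 :=
            (List.pairwise_cons.mp hpair).1 j3 (by simp)
          have hsep23 : j2 + 5 ≤ j3 ∨ j3 + 5 ≤ j2 :=
            (List.pairwise_cons.mp (List.pairwise_cons.mp hpair).2).1 j3 (by simp)
          have h3' := index?_rmAt_some hs pvS3 j1 j3 hidx3 hsep13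
          have h3'' := index?_rmAt_some (rmAt hs j1) pvS3 (if j2 < j1 then j2 else j2 - 5)
            (if j3 < j1 then j3 else j3 - 5) h3' (by split_ifs <;> omega)
          rw [rqbA_some "Q3" pvS3 _ _ rfl rfl h3'',
            bStep_some hs "Q3" pvS3 _ _ j3 rfl rfl hidx3]
          have hfun : (fun x => PySem.Set.contains (PySem.Set.update (PySem.Set.update
                (PySem.Set.update PySem.Set.empty
                  (PySem.List.pyRange (j1 : Int) ((j1 : Int) + pvQBS) 1))
                (PySem.List.pyRange (j2 : Int) ((j2 : Int) + pvQBS) 1))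
                (PySem.List.pyRange (j3 : Int) ((j3 : Int) + pvQBS) 1)) x)
              = fun x => pvR j1 x || (pvR j2 x || pvR j3 x) := by
            funext x
            rw [contains_update_range, contains_update_range, contains_update_range,
              contains_empty, Bool.false_or, Bool.or_assoc]
          rw [hfun, chain3 hs j1 j2 j3 hsep12 hsep13 hsep23]
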